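-- pv_equiv track=rewrite | github.com/krishxmatta/rosalind | scripts/rosalind_revc.py | gen_revc
-- ===== SOURCE A (Python) =====
-- def gen_revc(seq):
--     complement = {
--         'A':'t',
--         'T':'a',
--         'C':'g',
--         'G':'c',
--     }
--
--     for key, value in complement.items():
--         seq = seq.replace(key, value)
--
--     return seq.upper()[::-1]
-- ===== SOURCE B (Python) =====
-- def gen_revc(seq):
--     table = {'A': 'T', 'T': 'A', 'C': 'G', 'G': 'C'}
--     return ''.join(table.get(c, c.upper()) for c in reversed(seq))
-- ===== Notes on version B (the rewrite author's own statement) =====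
-- stated objective: idiomatic
-- what changed: B makes a single pass over the reversed string mapping each base through a complement table (uppercasing anything else), instead of A's four sequential full-string replace passes through a lowercase trick followed by upper() and a reversing slice.
import Mathlib
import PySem

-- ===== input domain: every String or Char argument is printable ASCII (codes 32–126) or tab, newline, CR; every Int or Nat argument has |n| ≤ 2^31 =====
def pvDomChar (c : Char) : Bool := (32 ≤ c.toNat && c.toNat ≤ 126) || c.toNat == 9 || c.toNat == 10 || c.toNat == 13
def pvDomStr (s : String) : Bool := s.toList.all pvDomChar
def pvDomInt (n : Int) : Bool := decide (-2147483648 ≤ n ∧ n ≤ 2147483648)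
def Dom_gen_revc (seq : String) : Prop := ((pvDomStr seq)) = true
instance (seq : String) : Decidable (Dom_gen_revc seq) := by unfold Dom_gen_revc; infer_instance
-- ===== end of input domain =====

-- B replaces A's four sequential full-string replace passes (via a lowercase trick) + upper() + reversing
-- slice by one pass over the reversed string mapping each base through an uppercase complement table.

-- ===== PORT A =====
-- A: replace each of 'A','T','C','G' by its lowercase complement in turn, then upper(), then [::-1].
def gen_revc (seq : String) : String :=
  let complement : PySem.Dict String String :=
    PySem.Dict.ofList [("A", "t"), ("T", "a"), ("C", "g"), ("G", "c")]
  let seq' := complement.items.foldl (fun s kv => PySem.Str.replace s kv.1 kv.2) seq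
  -- seq.upper()[::-1]; the slice with step -1 always returns a value (step ≠ 0)
  (PySem.Str.slice? (PySem.Str.upper seq') none none (-1)).getD ""

-- ===== PORT B =====
-- B: single pass over reversed(seq), table.get(c, c.upper()) for each character.
def gen_revc_alt (seq : String) : String :=
  let table : PySem.Dict Char Char :=
    PySem.Dict.ofList [('A', 'T'), ('T', 'A'), ('C', 'G'), ('G', 'C')]
  String.ofList (seq.toList.reverse.map (fun c => table.getD c (PySem.Chars.upperChar c)))

-- ===== PRECONDITION & SPEC =====
def Spec_gen_revc (seq : String) (out : String) : Prop := out = gen_revc_alt seq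
instance (seq : String) (out : String) : Decidable (Spec_gen_revc seq out) := by unfold Spec_gen_revc; infer_instance

-- ===== CLAIM (what is proved, stated in full; the proofs are below) =====
def Claim_equal_gen_revc : Prop := ∀ (seq : String), Dom_gen_revc seq → Spec_gen_revc seq (gen_revc seq)

-- ===== LEMMAS AND PROOFS =====

-- replace with a single-character pattern is a character map
theorem replace_go_single (a b : Char) :
    ∀ (l : List Char) (fuel : Nat) (acc : List Char), l.length ≤ fuel →
      PySem.Chars.replace.go [a] [b] fuel l acc =
        acc.reverse ++ l.map (fun c => if c = a then b else c) := by
  intro l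
  induction l with
  | nil =>
      intro fuel acc _
      cases fuel <;> simp [PySem.Chars.replace.go]
  | cons c t ih =>
      intro fuel acc h
      cases fuel with
      | zero => simp at h
      | succ n =>
        rw [PySem.Chars.replace.go]
        by_cases hc : c = a
        · subst hc
          simp only [List.isPrefixOf, BEq.rfl, Bool.true_and, if_pos,
            List.length_cons, List.length_nil, List.drop_succ_cons, List.drop_zero]
          rw [ih _ _ (Nat.le_of_succ_le_succ h)]
          simp
        · have : List.isPrefixOf [a] (c :: t) = false := by
            simp [List.isPrefixOf]
            exact fun h' => absurd h'.symm hc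
          rw [this]
          simp only [Bool.false_eq_true, if_false]
          rw [ih _ _ (Nat.le_of_succ_le_succ h)]
          simp [hc]

theorem replace_single (a b : Char) (s : List Char) :
    PySem.Chars.replace s [a] [b] = s.map (fun c => if c = a then b else c) := by
  rw [PySem.Chars.replace]
  rw [if_neg (by simp)]
  simpa using replace_go_single a b s s.length [] (Nat.le_refl _)

-- the composed per-character effect of A's four replaces + upperChar equals B's table lookup
theorem pointwise (c : Char) :
    PySem.Chars.upperChar
      (if (if (if (if c = 'A' then 't' else c) = 'T' then 'a' else (if c = 'A' then 't' else c)) = 'C' then 'g'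
          else (if (if c = 'A' then 't' else c) = 'T' then 'a' else (if c = 'A' then 't' else c))) = 'G' then 'c'
        else (if (if (if c = 'A' then 't' else c) = 'T' then 'a' else (if c = 'A' then 't' else c)) = 'C' then 'g'
          else (if (if c = 'A' then 't' else c) = 'T' then 'a' else (if c = 'A' then 't' else c)))) =
    (PySem.Dict.ofList [('A', 'T'), ('T', 'A'), ('C', 'G'), ('G', 'C')]).getD c (PySem.Chars.upperChar c) := by
  by_cases hA : c = 'A'
  · subst hA; decide
  by_cases hT : c = 'T'
  · subst hT; decide
  by_cases hC : c = 'C'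
  · subst hC; decide
  by_cases hG : c = 'G'
  · subst hG; decide
  have hi : (PySem.Dict.ofList [('A', 'T'), ('T', 'A'), ('C', 'G'), ('G', 'C')]).items
      = [('A', 'T'), ('T', 'A'), ('C', 'G'), ('G', 'C')] := by decide
  have h1 : (PySem.Dict.ofList [('A', 'T'), ('T', 'A'), ('C', 'G'), ('G', 'C')]).getD c (PySem.Chars.upperChar c)
      = PySem.Chars.upperChar c := by
    have bA : ('A' == c) = false := by simpa using Ne.symm hA
    have bT : ('T' == c) = false := by simpa using Ne.symm hT
    have bC : ('C' == c) = false := by simpa using Ne.symm hC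
    have bG : ('G' == c) = false := by simpa using Ne.symm hG
    simp [PySem.Dict.getD, PySem.Dict.get?, hi, List.find?, bA, bT, bC, bG]
  rw [h1]
  rw [if_neg hA, if_neg hT, if_neg hC, if_neg hG]

-- ===== VERDICT (by name: the statement is the Claim_ definition above) =====
set_option maxHeartbeats 1000000 in
theorem gen_revc_spec : Claim_equal_gen_revc := by
  intro seq _
  unfold Spec_gen_revc gen_revc gen_revc_alt
  have hitems : (PySem.Dict.ofList [("A", "t"), ("T", "a"), ("C", "g"), ("G", "c")]
      : PySem.Dict String String).items = [("A", "t"), ("T", "a"), ("C", "g"), ("G", "c")] := by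
    decide
  simp only [hitems]
  simp only [List.foldl]
  rw [PySem.Str.slice?_none_none_neg_one]
  simp only [Option.getD_some]
  refine congrArg String.ofList ?_
  have hrep : ∀ (s o n : String) (a b : Char), o.toList = [a] → n.toList = [b] →
      (PySem.Str.replace s o n).toList = s.toList.map (fun c => if c = a then b else c) := by
    intro s o n a b ho hn
    rw [PySem.Str.toList_replace, ho, hn]
    exact replace_single a b s.toList
  have hup : ∀ (s : String), (PySem.Str.upper s).toList = s.toList.map PySem.Chars.upperChar := by
    intro s
    rw [PySem.Str.toList_upper]
    rfl
  rw [hup, hrep _ "G" "c" 'G' 'c' rfl rfl, hrep _ "C" "g" 'C' 'g' rfl rfl,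
    hrep _ "T" "a" 'T' 'a' rfl rfl, hrep _ "A" "t" 'A' 't' rfl rfl]
  simp only [List.map_map, List.map_reverse]
  refine congrArg _ ?_
  apply List.map_congr_left
  intro c _
  exact pointwise c
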